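-- pv_equiv track=rewrite | github.com/MikeMull10/PyPROEv2 | handlers/inputfnc.py | group_by_sections
-- ===== SOURCE A (Python) =====
-- def group_by_sections(first_array, second_array):
--     groups = {}
--
--     for i in range(len(first_array)):
--         section_name = first_array[i][0]
--         start_index = first_array[i][1]
--
--         # Determine the end index for slicing
--         if i + 1 < len(first_array):
--             end_index = first_array[i + 1][1]
--         else:
--             end_index = len(second_array)
--
--         # Slice the second array and assign to the group
--         groups[section_name] = second_array[start_index:end_index]
--
--     return groups
-- ===== SOURCE B (Python) =====
-- def group_by_sections(first_array, second_array):
--     def go(rows):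
--         if not rows:
--             return []
--         name, start = rows[0]
--         rest = rows[1:]
--         end = rest[0][1] if rest else len(second_array)
--         return [(name, second_array[start:end])] + go(rest)
--     return dict(go(first_array))
-- ===== Notes on version B (the rewrite author's own statement) =====
-- stated objective: alternative
-- what changed: B replaces A's indexed loop (range over positions, i+1 look-ahead via indexing, dict mutated in the loop) with a structural head/rest recursion over first_array that builds the (name, slice) pair list and a final dict() conversion that realises the last-wins semantics.
import Mathlib
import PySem

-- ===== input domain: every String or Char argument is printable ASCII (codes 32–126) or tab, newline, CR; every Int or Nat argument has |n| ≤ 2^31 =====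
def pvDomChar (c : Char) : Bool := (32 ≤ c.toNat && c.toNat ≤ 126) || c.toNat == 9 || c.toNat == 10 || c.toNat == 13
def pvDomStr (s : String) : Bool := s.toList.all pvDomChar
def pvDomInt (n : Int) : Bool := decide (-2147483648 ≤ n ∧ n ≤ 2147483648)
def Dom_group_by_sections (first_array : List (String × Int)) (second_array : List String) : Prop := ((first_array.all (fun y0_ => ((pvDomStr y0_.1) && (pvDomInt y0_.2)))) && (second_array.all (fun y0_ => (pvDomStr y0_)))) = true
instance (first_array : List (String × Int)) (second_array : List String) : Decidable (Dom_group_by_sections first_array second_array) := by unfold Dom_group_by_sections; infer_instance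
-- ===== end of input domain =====

-- B replaces A's indexed loop with a structural head/rest recursion that builds the
-- (name, slice) pair list and converts it to a dict at the end (alternative decomposition).


-- ===== PORT A =====
def group_by_sections (first_array : List (String × Int)) (second_array : List String) : List (String × List String) :=
  ((PySem.List.pyRange 0 first_array.length 1).foldl (fun groups i =>
    let row := PySem.List.pyGetD first_array i ("", 0)
    let section_name := row.1
    let start_index := row.2
    let end_index : Int :=
      if i + 1 < (first_array.length : Int) then (PySem.List.pyGetD first_array (i + 1) ("", 0)).2
      else (second_array.length : Int)
    groups.insert section_name (PySem.List.slice second_array (some start_index) (some end_index)))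
    PySem.Dict.empty).items

-- ===== PORT B =====
-- the inner recursive helper 'go' of Source B
def goSections (second_array : List String) : List (String × Int) → List (String × List String)
  | [] => []
  | (name, start) :: rest =>
      let endIdx : Int :=
        match rest with
        | [] => (second_array.length : Int)
        | (_, e) :: _ => e
      (name, PySem.List.slice second_array (some start) (some endIdx)) :: goSections second_array rest

def group_by_sections_alt (first_array : List (String × Int)) (second_array : List String) : List (String × List String) :=
  (PySem.Dict.ofList (goSections second_array first_array)).items

-- ===== PRECONDITION & SPEC =====
def Spec_group_by_sections (first_array : List (String × Int)) (second_array : List String) (out : List (String × List String)) : Prop := out = group_by_sections_alt first_array second_array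
instance (first_array : List (String × Int)) (second_array : List String) (out : List (String × List String)) : Decidable (Spec_group_by_sections first_array second_array out) := by unfold Spec_group_by_sections; infer_instance

-- ===== CLAIM (what is proved, stated in full; the proofs are below) =====
def Claim_equal_group_by_sections : Prop := ∀ (first_array : List (String × Int)) (second_array : List String), Dom_group_by_sections first_array second_array → Spec_group_by_sections first_array second_array (group_by_sections first_array second_array)

-- ===== LEMMAS AND PROOFS =====

theorem goSections_length (sa : List String) (fa : List (String × Int)) :
    (goSections sa fa).length = fa.length := by
  induction fa with
  | nil => rfl
  | cons p rest ih => obtain ⟨n, s⟩ := p; simp [goSections, ih]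

theorem goSections_getElem (sa : List String) (fa : List (String × Int))
    (k : Nat) (hk : k < fa.length) :
    (goSections sa fa)[k]'(by rw [goSections_length]; exact hk) =
      (fa[k].1, PySem.List.slice sa (some fa[k].2)
        (some (if h : k + 1 < fa.length then fa[k+1].2 else (sa.length : Int)))) := by
  induction fa generalizing k with
  | nil => simp at hk
  | cons p rest ih =>
    obtain ⟨n, s⟩ := p
    cases k with
    | zero =>
      cases rest with
      | nil => simp [goSections]
      | cons q t => obtain ⟨n2, s2⟩ := q; simp [goSections]
    | succ k =>
      have hk' : k < rest.length := by simpa using hk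
      have := ih k hk'
      simp only [goSections, List.getElem_cons_succ]
      rw [this]
      by_cases h : k + 1 < rest.length
      · rw [dif_pos h, dif_pos (by simp; omega)]
      · rw [dif_neg h, dif_neg (by simp; omega)]

-- A's indexed pair list equals B's recursively built pair list.
theorem pairs_eq (fa : List (String × Int)) (sa : List String) :
    (PySem.List.pyRange 0 fa.length 1).map (fun i =>
      ((PySem.List.pyGetD fa i ("", 0)).1,
       PySem.List.slice sa (some (PySem.List.pyGetD fa i ("", 0)).2)
         (some (if i + 1 < (fa.length : Int) then (PySem.List.pyGetD fa (i + 1) ("", 0)).2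
                else (sa.length : Int))))) = goSections sa fa := by
  apply List.ext_getElem
  · simp [PySem.List.length_pyRange_one, goSections_length]
  · intro k h1 h2
    have hk : k < fa.length := by rw [goSections_length] at h2; exact h2
    have hr : k < (PySem.List.pyRange 0 (fa.length : Int) 1).length := by
      simpa using h1
    rw [List.getElem_map, goSections_getElem sa fa k hk]
    have hi : (PySem.List.pyRange 0 (fa.length : Int) 1)[k]'hr = (k : Int) := by
      rw [PySem.List.getElem_pyRange_one]; omega
    rw [hi]
    have hget : PySem.List.pyGetD fa (k : Int) ("", 0) = fa[k] := by
      rw [PySem.List.pyGetD_natCast, List.getD_eq_getElem fa _ hk]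
    rw [hget]
    congr 1
    congr 1
    by_cases h : k + 1 < fa.length
    · rw [dif_pos h, if_pos (by exact_mod_cast h)]
      have : ((k : Int) + 1) = ((k + 1 : Nat) : Int) := by push_cast; ring
      rw [this, PySem.List.pyGetD_natCast, List.getD_eq_getElem fa _ h]
    · rw [dif_neg h, if_neg (by omega)]

theorem group_by_sections_eq (fa : List (String × Int)) (sa : List String) :
    group_by_sections fa sa = group_by_sections_alt fa sa := by
  unfold group_by_sections group_by_sections_alt
  refine congrArg PySem.Dict.items ?_
  have hof : PySem.Dict.ofList (goSections sa fa)
      = (goSections sa fa).foldl (fun d p => d.insert p.1 p.2) PySem.Dict.empty := rfl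
  rw [hof, ← pairs_eq fa sa, List.foldl_map]

-- ===== VERDICT (by name: the statement is the Claim_ definition above) =====
theorem group_by_sections_spec : Claim_equal_group_by_sections := by
  intro fa sa _
  unfold Spec_group_by_sections
  exact group_by_sections_eq fa sa
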